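-- pv_equiv track=rewrite | github.com/AtteqCom/zsl | tests/resource/json_server_model_resource_test.py | is_descending
-- ===== SOURCE A (Python) =====
-- def is_descending(list_):
--     # type: (List[int]) -> bool
--     """Test if the list is in an descending order."""
--
--     try:
--         prev = list_[0]
--     except IndexError:
--         return True
--
--     for i in list_[1:]:
--         if prev < i:
--             return False
--         prev = i
--     return True
-- ===== SOURCE B (Python) =====
-- def is_descending(list_):
--     # type: (List[int]) -> bool
--     """Test if the list is in an descending order."""
--     return list_ == sorted(list_, reverse=True)
-- ===== Notes on version B (the rewrite author's own statement) =====
-- stated objective: idiomatic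
-- what changed: Replaced the explicit prev-tracking scan with short-circuit by a comparison of the list against its descending-sorted copy.
import Mathlib
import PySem

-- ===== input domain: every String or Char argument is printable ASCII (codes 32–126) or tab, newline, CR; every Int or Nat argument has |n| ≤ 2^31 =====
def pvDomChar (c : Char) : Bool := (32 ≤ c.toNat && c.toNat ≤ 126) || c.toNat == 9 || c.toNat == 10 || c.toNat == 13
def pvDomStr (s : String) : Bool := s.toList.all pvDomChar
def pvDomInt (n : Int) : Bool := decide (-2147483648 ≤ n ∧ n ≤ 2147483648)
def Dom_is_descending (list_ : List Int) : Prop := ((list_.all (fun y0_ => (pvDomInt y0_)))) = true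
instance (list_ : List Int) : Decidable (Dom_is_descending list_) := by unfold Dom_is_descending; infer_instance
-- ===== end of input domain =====

-- B replaces A's prev-tracking scan by comparing the list with its descending-sorted copy (idiomatic; same result, not faster).


-- ===== PORT A =====
-- loop over list_[1:] keeping prev; returns false on the first ascending adjacent pair
def isDescLoop (prev : Int) (rest : List Int) : Bool :=
  match rest with
  | [] => true
  | i :: t => if prev < i then false else isDescLoop i t

def is_descending (list_ : List Int) : Bool :=
  match list_ with
  | [] => true            -- IndexError on list_[0] → return True
  | prev :: rest => isDescLoop prev (PySem.List.slice (prev :: rest) (some 1) none)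

-- ===== PORT B =====
def is_descending_alt (list_ : List Int) : Bool :=
  list_ == PySem.List.sorted list_ (fun x => x) true

-- ===== PRECONDITION & SPEC =====
def Spec_is_descending (list_ : List Int) (out : Bool) : Prop := out = is_descending_alt list_
instance (list_ : List Int) (out : Bool) : Decidable (Spec_is_descending list_ out) := by unfold Spec_is_descending; infer_instance

-- ===== CLAIM (what is proved, stated in full; the proofs are below) =====
def Claim_equal_is_descending : Prop := ∀ (list_ : List Int), Dom_is_descending list_ → Spec_is_descending list_ (is_descending list_)

-- ===== LEMMAS AND PROOFS =====

-- ===== VERDICT (by name: the statement is the Claim_ definition above) =====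
-- the scan accepts exactly the adjacent-wise non-increasing lists
theorem isDescLoop_iff (prev : Int) (rest : List Int) :
    isDescLoop prev rest = true ↔ (prev :: rest).Pairwise (fun a b => b ≤ a) := by
  induction rest generalizing prev with
  | nil => simp [isDescLoop]
  | cons i t ih =>
    by_cases h : prev < i
    · simp only [isDescLoop, if_pos h, List.pairwise_cons]
      constructor
      · intro hf; exact absurd hf (by simp)
      · intro ⟨hp, _⟩; exact absurd (hp i (List.mem_cons_self ..)) (by omega)
    · rw [List.pairwise_cons]
      constructor
      · intro hl
        have hp := (ih i).mp (by simpa [isDescLoop, h] using hl)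
        refine ⟨?_, hp⟩
        intro a ha
        rcases List.mem_cons.mp ha with rfl | ha
        · omega
        · have := List.rel_of_pairwise_cons hp ha; omega
      · intro ⟨_, hp⟩
        simpa [isDescLoop, h] using (ih i).mpr hp

theorem is_descending_spec : Claim_equal_is_descending := by
  intro list_ _
  unfold Spec_is_descending is_descending_alt is_descending
  match list_ with
  | [] => decide
  | prev :: rest =>
    have hslice : PySem.List.slice (prev :: rest) (some 1) none = rest := by
      simp [PySem.List.slice_from_one]
    simp only [hslice]
    by_cases h : (prev :: rest).Pairwise (fun a b => b ≤ a)
    · rw [(isDescLoop_iff prev rest).mpr h,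
        PySem.List.sorted_rev_eq_self_of_pairwise (prev :: rest) (fun x => x) h]
      simp
    · have h1 : isDescLoop prev rest = false := by
        rcases Bool.eq_false_or_eq_true (isDescLoop prev rest) with h1 | h1
        · exact absurd ((isDescLoop_iff prev rest).mp h1) h
        · exact h1
      rw [h1]
      have h2 : PySem.List.sorted (prev :: rest) (fun x => x) true ≠ prev :: rest := by
        intro he
        exact h (by simpa [he] using PySem.List.sorted_pairwise_rev (prev :: rest) (fun x => x))
      simp
      exact fun he => h2 he.symm
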